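-- pv_equiv track=rewrite | github.com/luliboom/BED-simulation-detecting-interaction | functions.py | find_interactive_drugs
-- ===== SOURCE A (Python) =====
-- def find_interactive_drugs(D, part_add):
--     interactions = []
--     idx = 0
--     for i in range(D):
--         for j in range(i+1, D):
--             if part_add[idx] == 1:
--                 interactions.append((i,j))
--             idx += 1
--     return interactions
-- ===== SOURCE B (Python) =====
-- def find_interactive_drugs(D, part_add):
--     # Single pass over part_add with a (i, j) pair state machine; no index arithmetic.
--     interactions = []
--     i, j = 0, 1
--     for v in part_add:
--         if i >= D - 1:
--             break
--         if v == 1: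
--             interactions.append((i, j))
--         j += 1
--         if j == D:
--             i += 1
--             j = i + 1
--     return interactions
-- ===== Notes on version B (the rewrite author's own statement) =====
-- stated objective: alternative
-- what changed: Replaced A's nested i/j index loops with a running part_add[idx] counter by a single pass directly over part_add that maintains the current (i, j) pair as a small state machine, so no list indexing is performed at all.
import Mathlib
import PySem

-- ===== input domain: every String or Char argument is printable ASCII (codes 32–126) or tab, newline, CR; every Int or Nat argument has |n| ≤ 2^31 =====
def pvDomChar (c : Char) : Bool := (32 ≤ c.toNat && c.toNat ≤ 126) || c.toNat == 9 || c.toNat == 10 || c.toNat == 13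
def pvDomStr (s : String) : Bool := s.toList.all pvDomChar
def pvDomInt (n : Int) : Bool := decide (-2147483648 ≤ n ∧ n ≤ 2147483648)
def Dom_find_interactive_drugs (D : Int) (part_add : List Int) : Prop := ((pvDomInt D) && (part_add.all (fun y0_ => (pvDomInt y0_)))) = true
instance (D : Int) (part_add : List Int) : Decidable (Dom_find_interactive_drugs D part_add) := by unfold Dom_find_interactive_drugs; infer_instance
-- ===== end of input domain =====

-- B replaces A's nested index loops (with a running part_add[idx] counter) by a single pass
-- directly over part_add maintaining the current (i, j) pair as a state machine (objective: alternative).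


-- ===== PORT A =====
-- inner-loop body of A: 'if part_add[idx] == 1: interactions.append((i,j)); idx += 1'.
-- part_add[idx] is totalized with pyGetD _ _ 0; Pre_ guarantees idx is always in range,
-- so on admitted inputs the default is never used.
def innerStepA (part_add : List Int) (i : Int) (st : List (Int × Int) × Int) (j : Int) : List (Int × Int) × Int :=
  let st' := if PySem.List.pyGetD part_add st.2 0 = 1 then (st.1 ++ [(i, j)], st.2) else st
  (st'.1, st'.2 + 1)

def find_interactive_drugs (D : Int) (part_add : List Int) : List (Int × Int) :=
  ((PySem.List.pyRange 0 D 1).foldl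
    (fun st i => (PySem.List.pyRange (i+1) D 1).foldl (innerStepA part_add i) st)
    (([] : List (Int × Int)), (0 : Int))).1

-- ===== PORT B =====
-- single pass over part_add, maintaining the current pair (i, j); stops when i ≥ D-1 (B's break)
def fidGo (D : Int) (i j : Int) : List Int → List (Int × Int)
  | [] => []
  | v :: rest =>
    if i ≥ D - 1 then []
    else
      (if v = 1 then [(i, j)] else []) ++
        (if j + 1 = D then fidGo D (i+1) (i+2) rest else fidGo D i (j+1) rest)

def find_interactive_drugs_alt (D : Int) (part_add : List Int) : List (Int × Int) :=
  fidGo D 0 1 part_add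

-- ===== PRECONDITION & SPEC =====
-- Pre_ excludes exactly the inputs where A raises IndexError: 2 ≤ D with part_add shorter
-- than the D*(D-1)/2 flags A reads.
def Pre_find_interactive_drugs (D : Int) (part_add : List Int) : Prop :=
  2 ≤ D → D * (D - 1) ≤ 2 * (part_add.length : Int)
instance (D : Int) (part_add : List Int) : Decidable (Pre_find_interactive_drugs D part_add) := by unfold Pre_find_interactive_drugs; infer_instance

def pvWitness_find_interactive_drugs : Int × List Int := (3, [1, 0, 1])

def Spec_find_interactive_drugs (D : Int) (part_add : List Int) (out : List (Int × Int)) : Prop := out = find_interactive_drugs_alt D part_add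
instance (D : Int) (part_add : List Int) (out : List (Int × Int)) : Decidable (Spec_find_interactive_drugs D part_add out) := by unfold Spec_find_interactive_drugs; infer_instance

-- ===== CLAIM (what is proved, stated in full; the proofs are below) =====
def Claim_equal_find_interactive_drugs : Prop := ∀ (D : Int) (part_add : List Int), Dom_find_interactive_drugs D part_add → Pre_find_interactive_drugs D part_add → Spec_find_interactive_drugs D part_add (find_interactive_drugs D part_add)

-- ===== LEMMAS AND PROOFS =====

-- flagged pairs of the single row (i, j..), read from the current suffix of part_add
def rowPairs (i j : Int) : Nat → List Int → List (Int × Int)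
  | 0, _ => []
  | n+1, l =>
    (if l.headD 0 = 1 then [(i, j)] else []) ++ rowPairs i (j+1) n l.tail

theorem pyGetD_drop (l : List Int) (idx : Int) (h : 0 ≤ idx) :
    PySem.List.pyGetD l idx 0 = (l.drop idx.toNat).headD 0 := by
  have e : idx = ((idx.toNat : Nat) : Int) := (Int.toNat_of_nonneg h).symm
  rw [e, PySem.List.pyGetD_natCast]
  simp [List.getD_eq_getElem?_getD, List.headD_eq_head?_getD, List.head?_drop]
  rw [max_eq_left h]

theorem fidGo_stop (D i j : Int) (l : List Int) (h : D - 1 ≤ i) : fidGo D i j l = [] := by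
  cases l with
  | nil => rfl
  | cons v rest => simp [fidGo, show i ≥ D - 1 from h]

theorem inner_fold (D : Int) (part_add : List Int) (i : Int) :
    ∀ (n : Nat) (j idx : Int) (acc : List (Int × Int)),
    (n : Int) = D - j → 0 ≤ idx →
    (PySem.List.pyRange j D 1).foldl (innerStepA part_add i) (acc, idx)
      = (acc ++ rowPairs i j n (part_add.drop idx.toNat), idx + n) := by
  intro n
  induction n with
  | zero =>
    intro j idx acc hn hidx
    rw [PySem.List.pyRange_one_eq_nil (by omega : D ≤ j)]
    simp [rowPairs]
  | succ n ih =>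
    intro j idx acc hn hidx
    rw [PySem.List.pyRange_one_cons (by push_cast at hn; omega : j < D), List.foldl_cons]
    have hgl : PySem.List.pyGetD part_add idx 0 = (part_add.drop idx.toNat).headD 0 :=
      pyGetD_drop part_add idx hidx
    have hd : part_add.drop (idx+1).toNat = (part_add.drop idx.toNat).tail := by
      rw [show (idx+1).toNat = idx.toNat + 1 from by omega]
      exact List.tail_drop.symm
    have hn' : (n : Int) = D - (j+1) := by push_cast at hn ⊢; omega
    have hg2 : part_add[idx.toNat]?.getD 0 = (part_add.drop idx.toNat).headD 0 := by
      simp [List.headD_eq_head?_getD, List.head?_drop]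
    by_cases hv : (part_add.drop idx.toNat).headD 0 = 1
    · have hc : PySem.List.pyGetD part_add idx 0 = 1 := by rw [hgl]; exact hv
      have hv' : part_add[idx.toNat]?.getD 0 = 1 := by rw [hg2]; exact hv
      rw [show innerStepA part_add i (acc, idx) j = (acc ++ [(i, j)], idx + 1) from by
          simp [innerStepA, hc]]
      rw [ih (j+1) (idx+1) _ hn' (by omega), hd, Prod.ext_iff]
      exact ⟨by simp [rowPairs, hv', List.append_assoc], by push_cast; omega⟩
    · have hc : ¬ PySem.List.pyGetD part_add idx 0 = 1 := by rw [hgl]; exact hv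
      have hv' : ¬ part_add[idx.toNat]?.getD 0 = 1 := by rw [hg2]; exact hv
      rw [show innerStepA part_add i (acc, idx) j = (acc, idx + 1) from by
          simp [innerStepA, hc]]
      rw [ih (j+1) (idx+1) _ hn' (by omega), hd, Prod.ext_iff]
      exact ⟨by simp [rowPairs, hv'], by push_cast; omega⟩

theorem go_row (D : Int) :
    ∀ (n : Nat) (i j : Int) (l : List Int),
    ((n : Int) + 1) = D - j → i + 1 ≤ j → n + 1 ≤ l.length →
    fidGo D i j l = rowPairs i j (n+1) l ++ fidGo D (i+1) (i+2) (l.drop (n+1)) := by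
  intro n
  induction n with
  | zero =>
    intro i j l hn hij hl
    cases l with
    | nil => simp at hl
    | cons v rest =>
      have hi : ¬ i ≥ D - 1 := by omega
      have hj : j + 1 = D := by omega
      simp [fidGo, hi, hj, rowPairs]
  | succ n ih =>
    intro i j l hn hij hl
    cases l with
    | nil => simp at hl
    | cons v rest =>
      have hi : ¬ i ≥ D - 1 := by omega
      have hj : ¬ (j + 1 = D) := by push_cast at hn; omega
      simp only [fidGo, if_neg hi, if_neg hj]
      rw [ih i (j+1) rest (by push_cast at hn ⊢; omega) (by omega) (by simpa using hl)]
      simp [rowPairs, List.append_assoc]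

theorem main_fold (D : Int) (part_add : List Int) :
    ∀ (m : Nat) (i idx : Int) (acc : List (Int × Int)),
    (m : Int) = D - i → 0 ≤ i → 0 ≤ idx →
    m * (m - 1) ≤ 2 * (part_add.drop idx.toNat).length →
    ((PySem.List.pyRange i D 1).foldl
      (fun st i => (PySem.List.pyRange (i+1) D 1).foldl (innerStepA part_add i) st)
      (acc, idx)).1
      = acc ++ fidGo D i (i+1) (part_add.drop idx.toNat) := by
  intro m
  induction m with
  | zero =>
    intro i idx acc hm hi hidx _
    rw [PySem.List.pyRange_one_eq_nil (by omega : D ≤ i)]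
    rw [fidGo_stop D i (i+1) _ (by omega)]
    simp
  | succ k ih =>
    intro i idx acc hm hi hidx hlen
    have hiD : i < D := by push_cast at hm; omega
    have hk : (k : Int) = D - (i+1) := by push_cast at hm ⊢; omega
    rw [PySem.List.pyRange_one_cons hiD, List.foldl_cons,
        inner_fold D part_add i k (i+1) idx acc hk hidx]
    have hlen' : (k+1) * k ≤ 2 * (part_add.drop idx.toNat).length := by simpa using hlen
    have hL : k ≤ (part_add.drop idx.toNat).length := by nlinarith [hlen']
    have hd : part_add.drop (idx + (k:Int)).toNat = (part_add.drop idx.toNat).drop k := by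
      rw [show (idx + (k:Int)).toNat = idx.toNat + k from by omega]
      exact List.drop_drop.symm
    have hlen'' : k * (k - 1) ≤ 2 * (part_add.drop (idx + (k:Int)).toNat).length := by
      rw [hd, List.length_drop]
      cases k with
      | zero => simp
      | succ k' =>
        obtain ⟨L', hL'⟩ : ∃ L', (part_add.drop idx.toNat).length = L' + (k'+1) :=
          ⟨(part_add.drop idx.toNat).length - (k'+1), by omega⟩
        rw [hL'] at hlen' ⊢
        simp only [Nat.add_sub_cancel, Nat.succ_sub_one]
        nlinarith [hlen']
    rw [ih (i+1) (idx + (k:Int)) _ hk (by omega) (by omega) hlen'']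
    rw [show (i : Int) + 1 + 1 = i + 2 from by ring]
    cases k with
    | zero =>
      rw [fidGo_stop D (i+1) (i+2) _ (by omega), fidGo_stop D i (i+1) _ (by omega)]
      simp [rowPairs]
    | succ k' =>
      rw [go_row D k' i (i+1) (part_add.drop idx.toNat)
            (by push_cast at hk ⊢; omega) (le_refl _) (by simpa using hL)]
      rw [hd]
      simp [List.append_assoc]

-- ===== VERDICT (by name: the statement is the Claim_ definition above) =====
theorem find_interactive_drugs_spec : Claim_equal_find_interactive_drugs := by
  intro D pa _ hpre
  unfold Spec_find_interactive_drugs find_interactive_drugs find_interactive_drugs_alt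
  by_cases hD : D ≤ 0
  · rw [PySem.List.pyRange_one_eq_nil hD, fidGo_stop D 0 1 pa (by omega)]
    simp
  · have hm : ((D.toNat : Nat) : Int) = D - 0 := by omega
    have hlen : D.toNat * (D.toNat - 1) ≤ 2 * (pa.drop (0:Int).toNat).length := by
      simp only [Int.toNat_zero, List.drop_zero]
      by_cases h2 : 2 ≤ D
      · have h := hpre h2
        have hDt : ((D.toNat : Nat) : Int) = D := Int.toNat_of_nonneg (by omega)
        have e : ((D.toNat * (D.toNat - 1) : Nat) : Int) = D * (D - 1) := by
          rw [Nat.cast_mul, Nat.cast_sub (by omega : 1 ≤ D.toNat), hDt]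
          norm_num
        have : ((D.toNat * (D.toNat - 1) : Nat) : Int) ≤ ((2 * pa.length : Nat) : Int) := by
          rw [e]; push_cast; omega
        exact_mod_cast this
      · have : D = 1 := by omega
        subst this
        simp
    have := main_fold D pa D.toNat 0 0 [] hm (le_refl 0) (le_refl 0) hlen
    simpa using this
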